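-- pv_equiv track=rewrite | github.com/miliar/Code_Jam_Webscraper | solutions_python/Problem_201/2322.py | solutionC_small
-- ===== SOURCE A (Python) =====
-- import math
--
-- def solutionC_small(N, K):
--     N=int(N)
--     K=int(K)
--     while K > 0:
--         y, z = math.ceil((N-1)/2), math.floor((N-1)/2) # y=max(Ls, Rs) z=min(Ls, Rs)
--         if K%2==0: # right side
--             N = y
--         else :
--             N = z
--         K = K//2
--     return y, z
-- ===== SOURCE B (Python) =====
-- import math
--
-- def solutionC_small(N, K):
--     # closed form: the loop's final segment length is M = (N - (K - t)) // t
--     # where t is the highest power of two <= K; answer = (M//2, (M-1)//2).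
--     N = int(N)
--     K = int(K)
--     t = 1 << (K.bit_length() - 1)
--     M = (N - (K - t)) // t
--     return M // 2, (M - 1) // 2
-- ===== Notes on version B (the rewrite author's own statement) =====
-- stated objective: alternative
-- what changed: Replaces A's bit-by-bit while loop (descend left/right per bit of K) by a closed form: with t the highest power of two <= K, the final segment length is M = (N - (K - t)) // t and the answer is (M//2, (M-1)//2).
-- outside the precondition, e.g. on solutionC_small(10, 0): A raises NameError, B raises ValueError; on solutionC_small(10, -2): A raises NameError, B returns (3, 3)
import Mathlib
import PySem

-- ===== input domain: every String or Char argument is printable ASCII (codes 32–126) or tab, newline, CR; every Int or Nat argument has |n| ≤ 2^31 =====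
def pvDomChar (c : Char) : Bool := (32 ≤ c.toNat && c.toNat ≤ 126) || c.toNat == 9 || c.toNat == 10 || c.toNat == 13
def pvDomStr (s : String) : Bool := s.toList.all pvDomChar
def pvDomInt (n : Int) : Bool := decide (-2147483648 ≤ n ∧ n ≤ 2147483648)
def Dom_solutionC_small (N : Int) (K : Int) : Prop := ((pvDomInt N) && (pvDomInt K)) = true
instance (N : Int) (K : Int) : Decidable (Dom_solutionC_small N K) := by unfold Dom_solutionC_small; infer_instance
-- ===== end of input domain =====

-- B replaces A's bit-by-bit descent loop by a closed form (O(1) instead of O(log K)); return values proved equal.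

-- ===== PORT A =====
-- math.ceil((N-1)/2) / math.floor((N-1)/2) are ported as exact integer ceiling/floor
-- division; exact on the domain since |N| ≤ 2^31 < 2^53 keeps the float division exact.
-- Termination lemma for the while loop (cited by decreasing_by).
theorem pvHalfLt (K : Int) (h : 0 < PySem.Int.floordiv K 2) :
    (PySem.Int.floordiv K 2).toNat < K.toNat := by
  have h2 : (1 : Int) * 2 ≤ K := (PySem.Int.le_floordiv_iff_mul_le (by omega)).mp h
  have h3 : PySem.Int.floordiv K 2 < K :=
    (PySem.Int.floordiv_lt_iff_lt_mul (by omega)).mpr (by omega)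
  omega

def solutionC_smallLoop (N : Int) (K : Int) : Int × Int :=
  let y := -(PySem.Int.floordiv (-(N - 1)) 2)   -- math.ceil((N-1)/2)
  let z := PySem.Int.floordiv (N - 1) 2          -- math.floor((N-1)/2)
  let N' := if PySem.Int.mod K 2 = 0 then y else z
  let K' := PySem.Int.floordiv K 2
  if h : 0 < K' then solutionC_smallLoop N' K' else (y, z)
termination_by K.toNat
decreasing_by exact pvHalfLt K h

-- For K ≤ 0 the Python loop body never runs and `return y, z` raises NameError
-- (outside Pre_); the port returns (0, 0) there.
def solutionC_small (N : Int) (K : Int) : Int × Int :=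
  if 0 < K then solutionC_smallLoop N K else (0, 0)

-- ===== PORT B =====
-- t = 1 << (K.bit_length() - 1); M = (N - (K - t)) // t; return M // 2, (M - 1) // 2.
-- (At K = 0 the Python raises ValueError on the negative shift — outside Pre_.)
def solutionC_small_alt (N : Int) (K : Int) : Int × Int :=
  let t : Int := (1 : Int) <<< (PySem.Int.bitLength K - 1)
  let M := PySem.Int.floordiv (N - (K - t)) t
  (PySem.Int.floordiv M 2, PySem.Int.floordiv (M - 1) 2)

-- ===== PRECONDITION & SPEC =====
-- A raises NameError (y, z never bound) whenever K ≤ 0, so Pre_ requires 1 ≤ K.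
def Pre_solutionC_small (N : Int) (K : Int) : Prop := 1 ≤ K
instance (N : Int) (K : Int) : Decidable (Pre_solutionC_small N K) := by
  unfold Pre_solutionC_small; infer_instance

def pvWitness_solutionC_small : Int × Int := (10, 3)

def Spec_solutionC_small (N : Int) (K : Int) (out : Int × Int) : Prop := out = solutionC_small_alt N K
instance (N : Int) (K : Int) (out : Int × Int) : Decidable (Spec_solutionC_small N K out) := by
  unfold Spec_solutionC_small; infer_instance

-- ===== CLAIM (what is proved, stated in full; the proofs are below) =====
def Claim_equal_solutionC_small : Prop := ∀ (N : Int) (K : Int), Dom_solutionC_small N K → Pre_solutionC_small N K → Spec_solutionC_small N K (solutionC_small N K)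

-- ===== LEMMAS AND PROOFS =====

-- ceil((N-1)/2) = floor(N/2)
theorem pvCeilEq (N : Int) :
    -(PySem.Int.floordiv (-(N - 1)) 2) = PySem.Int.floordiv N 2 := by
  have h := (PySem.Int.floordiv_eq_iff_of_pos (a := N) (b := 2)
    (q := PySem.Int.floordiv N 2) (by omega)).mp rfl
  exact (PySem.Int.neg_floordiv_neg_eq_iff_of_pos (by omega)).mpr (by omega)

theorem pvFdOne (a : Int) : PySem.Int.floordiv a 1 = a :=
  (PySem.Int.floordiv_eq_iff_of_pos (by omega)).mpr (by omega)

-- floor(a/2) - c = floor((a - 2c)/2)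
theorem pvFdSub (a c : Int) :
    PySem.Int.floordiv a 2 - c = PySem.Int.floordiv (a - 2 * c) 2 := by
  have h := (PySem.Int.floordiv_eq_iff_of_pos (a := a) (b := 2)
    (q := PySem.Int.floordiv a 2) (by omega)).mp rfl
  exact ((PySem.Int.floordiv_eq_iff_of_pos (by omega)).mpr (by omega)).symm

-- floor(floor(a/m)/n) = floor(a/(m*n))
theorem pvFdFd (a m n : Int) (hm : 0 < m) (hn : 0 < n) :
    PySem.Int.floordiv (PySem.Int.floordiv a m) n = PySem.Int.floordiv a (m * n) := by
  have hmn : 0 < m * n := mul_pos hm hn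
  have h := (PySem.Int.floordiv_eq_iff_of_pos (a := a) (b := m * n)
    (q := PySem.Int.floordiv a (m * n)) hmn).mp rfl
  apply (PySem.Int.floordiv_eq_iff_of_pos hn).mpr
  constructor
  · apply (PySem.Int.le_floordiv_iff_mul_le hm).mpr
    nlinarith [h.1]
  · apply (PySem.Int.floordiv_lt_iff_lt_mul hm).mpr
    nlinarith [h.2]

theorem pvShiftPow (k : Nat) : ((1 : Int) <<< k) = 2 ^ k := by
  simp [Int.shiftLeft_eq]

theorem pvBitLenPos (K : Int) (h : 0 < K) : 1 ≤ PySem.Int.bitLength K := by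
  rw [PySem.Int.bitLength_of_pos h]; omega

-- main loop/closed-form correspondence
theorem pvLoopEq : ∀ (n : Nat) (K N : Int), K.toNat ≤ n → 0 < K →
    solutionC_smallLoop N K = solutionC_small_alt N K := by
  intro n
  induction n with
  | zero => intro K N hle hK; omega
  | succ n ih =>
    intro K N hle hK
    rw [solutionC_smallLoop]
    by_cases h1 : K = 1
    · subst h1
      rw [dif_neg (by decide)]
      have hm : PySem.Int.mod (1 : Int) 2 = 1 := by decide
      simp only [solutionC_small_alt]
      have hb : PySem.Int.bitLength (1 : Int) = 1 := by decide
      rw [hb]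
      simp only [Nat.sub_self]
      have hs : ((1 : Int) <<< (0 : Nat)) = 1 := by decide
      rw [hs, pvFdOne]
      rw [pvCeilEq]
      norm_num
    · -- K ≥ 2 : one loop step, then the induction hypothesis
      have hK2 : 2 ≤ K := by
        rcases lt_or_ge K 2 with h | h
        · omega
        · exact h
      set K' := PySem.Int.floordiv K 2 with hK'
      have hK'pos : 0 < K' := by
        rw [hK']; exact (PySem.Int.le_floordiv_iff_mul_le (by omega)).mpr (by omega)
      rw [dif_pos hK'pos]
      have hrec : (K - PySem.Int.mod K 2) = K' * 2 := by
        have := PySem.Int.floordiv_mul_add_mod K 2; omega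
      have hlt : K'.toNat ≤ n := by
        have := pvHalfLt K hK'pos; omega
      -- the chosen child length is floor((N - r)/2) with r = K mod 2
      have hchild : (if PySem.Int.mod K 2 = 0 then -(PySem.Int.floordiv (-(N - 1)) 2)
          else PySem.Int.floordiv (N - 1) 2)
          = PySem.Int.floordiv (N - PySem.Int.mod K 2) 2 := by
        rcases PySem.Int.mod_two_eq K with hr | hr
        · rw [hr, if_pos rfl, pvCeilEq]; norm_num
        · rw [hr, if_neg (by omega)]
      rw [hchild, ih K' _ hlt hK'pos]
      -- both alt's agree: push the extra halving into the closed form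
      simp only [solutionC_small_alt, pvShiftPow]
      have hbl : PySem.Int.bitLength K = PySem.Int.bitLength K' + 1 := by
        rw [PySem.Int.bitLength_of_pos hK]
      have hbl' : 1 ≤ PySem.Int.bitLength K' := pvBitLenPos K' hK'pos
      set b := PySem.Int.bitLength K' - 1 with hb
      have hbK : PySem.Int.bitLength K - 1 = b + 1 := by omega
      rw [hbK]
      have ht : ((2 : Int) ^ (b + 1)) = 2 * 2 ^ b := by ring
      rw [ht]
      have htpos : (0 : Int) < 2 ^ b := by positivity
      have hM : PySem.Int.floordiv (PySem.Int.floordiv (N - PySem.Int.mod K 2) 2 - (K' - 2 ^ b)) (2 ^ b)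
          = PySem.Int.floordiv (N - (K - 2 * 2 ^ b)) (2 * 2 ^ b) := by
        rw [pvFdSub, pvFdFd _ 2 (2 ^ b) (by omega) htpos]
        have harg : N - PySem.Int.mod K 2 - 2 * (K' - 2 ^ b) = N - (K - 2 * 2 ^ b) := by
          omega
        rw [harg]
      rw [hM]

-- ===== VERDICT (by name: the statement is the Claim_ definition above) =====
theorem solutionC_small_spec : Claim_equal_solutionC_small := by
  intro N K _ hpre
  unfold Pre_solutionC_small at hpre
  unfold Spec_solutionC_small solutionC_small
  rw [if_pos (by exact lt_of_lt_of_le Int.zero_lt_one hpre)]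
  exact pvLoopEq K.toNat K N (le_refl _) (by omega)
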